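-- pv_equiv track=rewrite | github.com/daviburg/narrative-state-engine | tools/generate_wiki_pages.py | _infer_type_from_id
-- ===== SOURCE A (Python) =====
-- def _infer_type_from_id(entity_id: str) -> str:
--     """Infer entity type directory from ID prefix."""
--     prefix_map = {
--         "char-": "characters",
--         "loc-": "locations",
--         "faction-": "factions",
--         "item-": "items",
--         "creature-": "characters",
--         "concept-": "items",
--     }
--     for prefix, etype in prefix_map.items():
--         if entity_id.startswith(prefix):
--             return etype
--     return ""
-- ===== SOURCE B (Python) =====
-- def _infer_type_from_id(entity_id: str) -> str:
--     """Infer entity type directory from ID prefix."""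
--     prefix_map = {
--         "char-": "characters",
--         "loc-": "locations",
--         "faction-": "factions",
--         "item-": "items",
--         "creature-": "characters",
--         "concept-": "items",
--     }
--     # slice up to and including the first '-' (empty when there is no '-'),
--     # then a single dict lookup instead of scanning all prefixes
--     key = entity_id[:entity_id.find("-") + 1]
--     return prefix_map.get(key, "")
-- ===== Notes on version B (the rewrite author's own statement) =====
-- stated objective: simpler
-- what changed: Replaces the scan over all six prefixes with startswith tests by computing the candidate prefix once (slice up to the first '-') and doing a single dict lookup.
import Mathlib
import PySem

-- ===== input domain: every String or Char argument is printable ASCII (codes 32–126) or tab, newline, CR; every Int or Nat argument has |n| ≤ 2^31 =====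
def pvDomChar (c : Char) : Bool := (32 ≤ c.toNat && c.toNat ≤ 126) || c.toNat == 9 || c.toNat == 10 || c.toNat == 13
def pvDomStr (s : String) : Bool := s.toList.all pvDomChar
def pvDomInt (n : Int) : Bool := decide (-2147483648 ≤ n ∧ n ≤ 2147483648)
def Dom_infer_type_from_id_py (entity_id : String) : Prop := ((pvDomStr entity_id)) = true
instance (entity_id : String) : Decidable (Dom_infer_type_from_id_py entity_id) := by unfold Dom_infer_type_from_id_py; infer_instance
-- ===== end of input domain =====

-- B computes the candidate prefix once (slice up to and including the first '-') and does a
-- single dict lookup, instead of A's scan over all six prefixes with startswith tests.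


-- ===== PORT A =====
-- the dict literal both sources build (Python source insertion order)
def pvPrefixMap : PySem.Dict String String :=
  ((((((PySem.Dict.mk []).insert "char-" "characters").insert "loc-" "locations").insert
      "faction-" "factions").insert "item-" "items").insert
      "creature-" "characters").insert "concept-" "items"

-- A's for-loop over prefix_map.items(): return the first etype whose prefix matches
def pvFirstMatch (s : String) : List (String × String) → String
  | [] => ""
  | (p, e) :: rest => if PySem.Str.startswith s p then e else pvFirstMatch s rest

def infer_type_from_id_py (entity_id : String) : String :=
  pvFirstMatch entity_id pvPrefixMap.items

-- ===== PORT B =====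
-- key = entity_id[:entity_id.find("-") + 1]; return prefix_map.get(key, "")
def infer_type_from_id_py_alt (entity_id : String) : String :=
  let key := PySem.Str.slice entity_id none (some (PySem.Str.find entity_id "-" + 1))
  pvPrefixMap.getD key ""

-- ===== PRECONDITION & SPEC =====
def Spec_infer_type_from_id_py (entity_id : String) (out : String) : Prop := out = infer_type_from_id_py_alt entity_id
instance (entity_id : String) (out : String) : Decidable (Spec_infer_type_from_id_py entity_id out) := by unfold Spec_infer_type_from_id_py; infer_instance

-- ===== CLAIM (what is proved, stated in full; the proofs are below) =====
def Claim_equal_infer_type_from_id_py : Prop := ∀ (entity_id : String), Dom_infer_type_from_id_py entity_id → Spec_infer_type_from_id_py entity_id (infer_type_from_id_py entity_id)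

-- ===== LEMMAS AND PROOFS =====

-- the key B slices out of the string, characterised on the char list
def pvKey (cs : List Char) : List Char :=
  if '-' ∈ cs then cs.takeWhile (· ≠ '-') ++ ['-'] else []

theorem pv_split (cs : List Char) :
    cs.takeWhile (· ≠ '-') ++ cs.dropWhile (· ≠ '-') = cs :=
  List.takeWhile_append_dropWhile

theorem pv_drop_ne (cs : List Char) (h : '-' ∈ cs) :
    cs.dropWhile (· ≠ '-') ≠ [] := by
  intro h2
  have htw : cs.takeWhile (· ≠ '-') = cs := by
    have := pv_split cs
    rw [h2, List.append_nil] at this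
    exact this
  have := List.mem_takeWhile_imp (p := fun x => decide (x ≠ '-')) (htw ▸ h)
  simp at this

theorem pv_drop_head : ∀ (cs : List Char) (a : Char) (t : List Char),
    cs.dropWhile (· ≠ '-') = a :: t → a = '-' := by
  intro cs
  induction cs with
  | nil => intro a t h; simp [List.dropWhile] at h
  | cons c r ih =>
    intro a t h
    by_cases hc : c = '-'
    · subst hc; simp [List.dropWhile] at h; exact h.1.symm
    · rw [List.dropWhile_cons_of_pos (by simp [hc])] at h
      exact ih a t h

theorem pv_cs_eq (cs : List Char) (h : '-' ∈ cs) :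
    cs = cs.takeWhile (· ≠ '-') ++ '-' :: (cs.dropWhile (· ≠ '-')).tail := by
  conv_lhs => rw [← pv_split cs]
  rcases h2 : cs.dropWhile (· ≠ '-') with _ | ⟨a, t⟩
  · exact absurd h2 (pv_drop_ne cs h)
  · rw [pv_drop_head cs a t h2]; simp

theorem pv_tw_lt (cs : List Char) (h : '-' ∈ cs) :
    (cs.takeWhile (· ≠ '-')).length < cs.length := by
  have h1 := congrArg List.length (pv_split cs)
  rw [List.length_append] at h1
  have h2 : 0 < (cs.dropWhile (· ≠ '-')).length :=
    List.length_pos_of_ne_nil (pv_drop_ne cs h)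
  omega

-- B's slice really is the first segment plus the dash (or empty when there is no dash)
theorem pv_key_eq (s : String) :
    (PySem.Str.slice s none (some (PySem.Str.find s "-" + 1))).toList = pvKey s.toList := by
  have pv_find_go : ∀ (cs : List Char) (k : Nat),
      PySem.Chars.find.go ['-'] cs k =
        if '-' ∈ cs then ((k : Int) + (cs.takeWhile (· ≠ '-')).length) else -1 := by
    intro cs
    induction cs with
    | nil => intro k; simp [PySem.Chars.find.go]
    | cons c rest ih =>
      intro k
      by_cases hc : c = '-'
      · subst hc; simp [PySem.Chars.find.go, List.isPrefixOf, List.takeWhile]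
      · have : (['-'].isPrefixOf (c :: rest)) = false := by
          simp [List.isPrefixOf]; exact fun h => (hc h.symm).elim
        rw [PySem.Chars.find.go]
        simp only [this, if_false, Bool.false_eq_true]
        rw [ih (k + 1)]
        by_cases hm : '-' ∈ rest
        · simp [hm, hc, List.takeWhile, Ne.symm hc]; ring
        · have : '-' ∉ c :: rest := by simp [hm, Ne.symm hc]
          simp [hm, this]
  have hf : PySem.Str.find s "-" = PySem.Chars.find.go ['-'] s.toList 0 := rfl
  rw [hf, pv_find_go]
  by_cases hm : '-' ∈ s.toList
  · rw [if_pos hm]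
    have hlt := pv_tw_lt s.toList hm
    set L := (s.toList.takeWhile (· ≠ '-')).length with hL
    have hb : PySem.List.clampIdx s.toList.length (((0 : Nat) : Int) + L + 1) = L + 1 := by
      unfold PySem.List.clampIdx
      rw [if_neg (by omega)]
      have h0 : (((0 : Nat) : Int) + L + 1).toNat = L + 1 := by omega
      rw [h0]
      omega
    have h1 : (PySem.Str.slice s none (some (((0 : Nat) : Int) + L + 1))).toList
        = List.take (L + 1) s.toList := by
      show (String.ofList (PySem.Chars.slice s.toList none (some (((0 : Nat) : Int) + L + 1)))).toList = _
      rw [String.toList_ofList]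
      show List.take (PySem.List.clampIdx s.toList.length (((0 : Nat) : Int) + L + 1) - 0)
        (List.drop 0 s.toList) = _
      rw [hb]
      simp
    rw [h1, pvKey, if_pos hm]
    conv_lhs => rw [pv_cs_eq s.toList hm]
    rw [show L + 1 = (s.toList.takeWhile (· ≠ '-')).length + 1 from rfl]
    rw [List.take_append]
    simp
  · rw [if_neg hm, pvKey, if_neg hm]
    show (String.ofList (PySem.List.slice s.toList none (some (-1 + 1)))).toList = []
    rw [String.toList_ofList]
    unfold PySem.List.slice PySem.List.clampIdx
    norm_num

theorem pv_tw_append (w t : List Char) (hw : '-' ∉ w) :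
    (w ++ '-' :: t).takeWhile (· ≠ '-') = w := by
  induction w with
  | nil => simp
  | cons c r ih =>
    have hc : c ≠ '-' := fun h => hw (by simp [h])
    have hr : '-' ∉ r := fun h => hw (by simp [h])
    rw [List.cons_append, List.takeWhile_cons_of_pos (by simp [hc]), ih hr]

-- startswith against a dash-free word followed by '-' is exactly a key match
theorem pv_startswith_iff (cs w : List Char) (hw : '-' ∉ w) :
    PySem.Chars.startswith cs (w ++ ['-']) = true ↔ pvKey cs = w ++ ['-'] := by
  constructor
  · intro h
    have hp : (w ++ ['-']) <+: cs := by
      rw [PySem.Chars.startswith] at h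
      exact List.isPrefixOf_iff_prefix.mp h
    obtain ⟨t, ht⟩ := hp
    have hcs : cs = w ++ '-' :: t := by rw [← ht]; simp
    have hm : '-' ∈ cs := by rw [hcs]; simp
    rw [pvKey, if_pos hm, hcs, pv_tw_append w t hw]
  · intro h
    by_cases hm : '-' ∈ cs
    · rw [pvKey, if_pos hm] at h
      have htw : cs.takeWhile (· ≠ '-') = w := List.append_inj_left' h (by simp)
      rw [PySem.Chars.startswith]
      apply List.isPrefixOf_iff_prefix.mpr
      refine ⟨(cs.dropWhile (· ≠ '-')).tail, ?_⟩
      rw [← htw]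
      simp only [List.append_assoc, List.singleton_append]
      exact (pv_cs_eq cs hm).symm
    · rw [pvKey, if_neg hm] at h
      exact absurd h.symm (by simp)

-- string equality against a literal key, through toList
theorem pv_beq_toList (a b : String) : (a == b) = (a.toList == b.toList) := by
  cases h : a.toList == b.toList
  · simp only [beq_eq_false_iff_ne] at h
    simp only [beq_eq_false_iff_ne]
    exact fun he => h (he ▸ rfl)
  · simp only [beq_iff_eq] at h ⊢
    exact String.toList_inj.mp h

-- ===== VERDICT (by name: the statement is the Claim_ definition above) =====
theorem infer_type_from_id_py_spec : Claim_equal_infer_type_from_id_py := by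
  intro s _
  unfold Spec_infer_type_from_id_py infer_type_from_id_py infer_type_from_id_py_alt
  have hitems : pvPrefixMap.items =
      [("char-", "characters"), ("loc-", "locations"), ("faction-", "factions"),
       ("item-", "items"), ("creature-", "characters"), ("concept-", "items")] := by decide
  rw [hitems]
  show pvFirstMatch s _ =
    pvPrefixMap.getD (PySem.Str.slice s none (some (PySem.Str.find s "-" + 1))) ""
  rw [PySem.Dict.getD, PySem.Dict.get?, hitems]
  set key := PySem.Str.slice s none (some (PySem.Str.find s "-" + 1)) with hkdef
  have hk : key.toList = pvKey s.toList := pv_key_eq s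
  have hbeq : ∀ (a : String), (a == key) = (a.toList == pvKey s.toList) := by
    intro a; rw [pv_beq_toList, hk]
  have h1 : PySem.Chars.startswith s.toList ['c','h','a','r','-'] = true ↔
      pvKey s.toList = ['c','h','a','r','-'] := by
    simpa using pv_startswith_iff s.toList ['c','h','a','r'] (by decide)
  have h2 : PySem.Chars.startswith s.toList ['l','o','c','-'] = true ↔
      pvKey s.toList = ['l','o','c','-'] := by
    simpa using pv_startswith_iff s.toList ['l','o','c'] (by decide)
  have h3 : PySem.Chars.startswith s.toList ['f','a','c','t','i','o','n','-'] = true ↔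
      pvKey s.toList = ['f','a','c','t','i','o','n','-'] := by
    simpa using pv_startswith_iff s.toList ['f','a','c','t','i','o','n'] (by decide)
  have h4 : PySem.Chars.startswith s.toList ['i','t','e','m','-'] = true ↔
      pvKey s.toList = ['i','t','e','m','-'] := by
    simpa using pv_startswith_iff s.toList ['i','t','e','m'] (by decide)
  have h5 : PySem.Chars.startswith s.toList ['c','r','e','a','t','u','r','e','-'] = true ↔
      pvKey s.toList = ['c','r','e','a','t','u','r','e','-'] := by
    simpa using pv_startswith_iff s.toList ['c','r','e','a','t','u','r','e'] (by decide)
  have h6 : PySem.Chars.startswith s.toList ['c','o','n','c','e','p','t','-'] = true ↔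
      pvKey s.toList = ['c','o','n','c','e','p','t','-'] := by
    simpa using pv_startswith_iff s.toList ['c','o','n','c','e','p','t'] (by decide)
  simp only [pvFirstMatch, List.find?]
  by_cases c1 : pvKey s.toList = ['c','h','a','r','-']
  · simp [h1, c1, hbeq]
  · by_cases c2 : pvKey s.toList = ['l','o','c','-']
    · simp [h1, h2, c1, c2, hbeq]
    · by_cases c3 : pvKey s.toList = ['f','a','c','t','i','o','n','-']
      · simp [h1, h2, h3, c1, c2, c3, hbeq]
      · by_cases c4 : pvKey s.toList = ['i','t','e','m','-']
        · simp [h1, h2, h3, h4, c1, c2, c3, c4, hbeq]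
        · by_cases c5 : pvKey s.toList = ['c','r','e','a','t','u','r','e','-']
          · simp [h1, h2, h3, h4, h5, c1, c2, c3, c4, c5, hbeq]
          · by_cases c6 : pvKey s.toList = ['c','o','n','c','e','p','t','-']
            · simp [h1, h2, h3, h4, h5, h6, c1, c2, c3, c4, c5, c6, hbeq]
            · have d1 : (['c','h','a','r','-'] == pvKey s.toList) = false :=
                beq_eq_false_iff_ne.mpr (Ne.symm c1)
              have d2 : (['l','o','c','-'] == pvKey s.toList) = false :=
                beq_eq_false_iff_ne.mpr (Ne.symm c2)
              have d3 : (['f','a','c','t','i','o','n','-'] == pvKey s.toList) = false :=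
                beq_eq_false_iff_ne.mpr (Ne.symm c3)
              have d4 : (['i','t','e','m','-'] == pvKey s.toList) = false :=
                beq_eq_false_iff_ne.mpr (Ne.symm c4)
              have d5 : (['c','r','e','a','t','u','r','e','-'] == pvKey s.toList) = false :=
                beq_eq_false_iff_ne.mpr (Ne.symm c5)
              have d6 : (['c','o','n','c','e','p','t','-'] == pvKey s.toList) = false :=
                beq_eq_false_iff_ne.mpr (Ne.symm c6)
              simp [h1, h2, h3, h4, h5, h6, c1, c2, c3, c4, c5, c6, hbeq,
                d1, d2, d3, d4, d5, d6]
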